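-- pv_equiv track=rewrite | github.com/Zettelkasten/advent-of-code | 2024/dec07/dec07.py | can_do
-- ===== SOURCE A (Python) =====
-- def can_do(left, rights):
--     if len(rights) == 1:
--         return left == rights[0]
--     else:
--         *rest, last = rights
--         if left % last == 0 and can_do(left // last, rest):
--             return True
--         elif left - last >= 0 and can_do(left - last, rest):
--             return True
--         elif str(left).endswith(str(last)) and can_do(left // (10 ** len(str(last))), rest):
--             return True
--         return False
-- ===== SOURCE B (Python) =====
-- def can_do(left, rights):
--     # Level-set BFS over reverse operations instead of A's backward recursion.
--     states = {left}
--     for last in reversed(rights[1:]):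
--         nxt = set()
--         for t in states:
--             if t % last == 0:
--                 nxt.add(t // last)
--             if t - last >= 0:
--                 nxt.add(t - last)
--             if str(t).endswith(str(last)):
--                 nxt.add(t // (10 ** len(str(last))))
--         states = nxt
--     return rights[0] in states
-- ===== Notes on version B (the rewrite author's own statement) =====
-- stated objective: faster
-- what changed: Replaced A's backward depth-first recursion (peeling the last operand and trying div/sub/de-concat in order) by an iterative level-set search: one pass over the reversed operand tail maintaining the deduplicated set of all reachable intermediate targets, then a membership test against the first operand.
-- outside the precondition, e.g. on can_do(3, [7, 0, 5]): A returns False, B returns False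
import Mathlib
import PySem

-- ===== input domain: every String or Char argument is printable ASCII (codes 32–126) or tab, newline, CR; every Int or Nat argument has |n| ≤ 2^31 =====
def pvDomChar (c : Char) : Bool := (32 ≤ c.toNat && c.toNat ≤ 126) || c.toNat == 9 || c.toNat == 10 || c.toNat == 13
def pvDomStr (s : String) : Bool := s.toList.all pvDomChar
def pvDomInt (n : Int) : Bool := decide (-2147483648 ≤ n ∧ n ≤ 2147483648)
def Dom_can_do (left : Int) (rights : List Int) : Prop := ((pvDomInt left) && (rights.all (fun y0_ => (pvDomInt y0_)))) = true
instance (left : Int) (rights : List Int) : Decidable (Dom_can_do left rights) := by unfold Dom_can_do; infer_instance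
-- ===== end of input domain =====

-- B replaces A's backward depth-first recursion by an iterative level-set search whose set
-- deduplicates intermediate targets (measurably faster on the generated timing inputs).

-- ===== PORT A =====
-- literal transliteration of A's recursion (eliminated last operand, three ordered branches)
def can_do (left : Int) (rights : List Int) : Bool :=
  match rights with
  | [] => false          -- Python raises ValueError (unpacking) here; excluded by Pre_
  | [r] => decide (left = r)
  | a :: b :: t =>
    let rest := (a :: b :: t).dropLast
    let last := (b :: t).getLast (by simp)
    if PySem.Int.mod left last = 0 && can_do (PySem.Int.floordiv left last) rest then true
    else if decide (left - last ≥ 0) && can_do (left - last) rest then true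
    else if PySem.Str.endswith (PySem.Int.toStr left) (PySem.Int.toStr last)
            && can_do (PySem.Int.floordiv left ((10:Int) ^ (PySem.Str.len (PySem.Int.toStr last)).toNat)) rest then true
    else false
termination_by rights.length
decreasing_by all_goals simp

-- ===== PORT B =====
-- predecessor accumulation for one state t under reverse operand `last` (Source B inner loop body)
def pvPreds (last : Int) (acc : PySem.Set Int) (t : Int) : PySem.Set Int :=
  let acc1 := if PySem.Int.mod t last = 0 then PySem.Set.add acc (PySem.Int.floordiv t last) else acc
  let acc2 := if t - last ≥ 0 then PySem.Set.add acc1 (t - last) else acc1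
  if PySem.Str.endswith (PySem.Int.toStr t) (PySem.Int.toStr last) then
    PySem.Set.add acc2 (PySem.Int.floordiv t ((10:Int) ^ (PySem.Str.len (PySem.Int.toStr last)).toNat))
  else acc2

-- one pass of Source B's outer loop: next level set from the current one
def pvStep (states : PySem.Set Int) (last : Int) : PySem.Set Int :=
  states.foldl (pvPreds last) PySem.Set.empty

def can_do_alt (left : Int) (rights : List Int) : Bool :=
  let states := ((rights.drop 1).reverse).foldl pvStep (PySem.Set.ofList [left])
  match PySem.List.pyGet? rights 0 with
  | none => false        -- Python raises IndexError here; excluded by Pre_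
  | some r0 => decide (r0 ∈ states)

-- ===== PRECONDITION & SPEC =====
-- Pre_ excludes rights = [] (A raises ValueError) and any zero among rights[1:], on which both
-- programs raise ZeroDivisionError when that operand is reached; this also excludes some inputs
-- whose zero operand is never reached, where A simply returns False (see claim cites).
def Pre_can_do (left : Int) (rights : List Int) : Prop :=
  rights ≠ [] ∧ ∀ x ∈ rights.drop 1, x ≠ 0
instance (left : Int) (rights : List Int) : Decidable (Pre_can_do left rights) := by
  unfold Pre_can_do; infer_instance

def pvWitness_can_do : Int × List Int := (190, [19, 10, 1])

def Spec_can_do (left : Int) (rights : List Int) (out : Bool) : Prop := out = can_do_alt left rights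
instance (left : Int) (rights : List Int) (out : Bool) : Decidable (Spec_can_do left rights out) := by
  unfold Spec_can_do; infer_instance

-- ===== CLAIM (what is proved, stated in full; the proofs are below) =====
def Claim_equal_can_do : Prop := ∀ (left : Int) (rights : List Int), Dom_can_do left rights → Pre_can_do left rights → Spec_can_do left rights (can_do left rights)

-- ===== LEMMAS AND PROOFS =====

-- the reverse-operation relation: x is a predecessor of t under operand `last`
def pvRel (last t x : Int) : Prop :=
  (PySem.Int.mod t last = 0 ∧ x = PySem.Int.floordiv t last)
  ∨ (t - last ≥ 0 ∧ x = t - last)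
  ∨ (PySem.Str.endswith (PySem.Int.toStr t) (PySem.Int.toStr last) = true
      ∧ x = PySem.Int.floordiv t ((10:Int) ^ (PySem.Str.len (PySem.Int.toStr last)).toNat))

-- chain of reverse operations from t through rl ending at r0
def pvChain (t : Int) (rl : List Int) (r0 : Int) : Prop :=
  match rl with
  | [] => t = r0
  | last :: rest => ∃ x, pvRel last t x ∧ pvChain x rest r0

lemma mem_ite_add (c : Prop) [Decidable c] (s : PySem.Set Int) (y x : Int) :
    (x ∈ (if c then PySem.Set.add s y else s)) ↔ x ∈ s ∨ (c ∧ x = y) := by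
  split_ifs with h
  · rw [PySem.Set.mem_add]; tauto
  · tauto

lemma mem_pvPreds (last : Int) (acc : PySem.Set Int) (t x : Int) :
    x ∈ pvPreds last acc t ↔ x ∈ acc ∨ pvRel last t x := by
  unfold pvPreds pvRel
  rw [mem_ite_add, mem_ite_add, mem_ite_add]
  tauto

lemma mem_foldl_pvPreds (last : Int) (l : List Int) (acc : PySem.Set Int) (x : Int) :
    x ∈ l.foldl (pvPreds last) acc ↔ x ∈ acc ∨ ∃ t ∈ l, pvRel last t x := by
  induction l generalizing acc with
  | nil => simp
  | cons hd tl ih =>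
    rw [List.foldl_cons, ih, mem_pvPreds]
    constructor
    · rintro ((h|h)|⟨t, ht, hr⟩)
      · exact Or.inl h
      · exact Or.inr ⟨hd, List.mem_cons_self, h⟩
      · exact Or.inr ⟨t, List.mem_cons_of_mem _ ht, hr⟩
    · rintro (h|⟨t, ht, hr⟩)
      · exact Or.inl (Or.inl h)
      · rcases List.mem_cons.1 ht with rfl | ht
        · exact Or.inl (Or.inr hr)
        · exact Or.inr ⟨t, ht, hr⟩

lemma mem_pvStep (S : PySem.Set Int) (last x : Int) :
    x ∈ pvStep S last ↔ ∃ t ∈ S, pvRel last t x := by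
  unfold pvStep
  rw [mem_foldl_pvPreds]
  simp [PySem.Set.empty]

lemma mem_foldl_pvStep (rl : List Int) (S : PySem.Set Int) (r0 : Int) :
    r0 ∈ rl.foldl pvStep S ↔ ∃ t ∈ S, pvChain t rl r0 := by
  induction rl generalizing S with
  | nil => simp [pvChain]
  | cons last rest ih =>
    rw [List.foldl_cons, ih]
    constructor
    · rintro ⟨x, hx, hc⟩
      rw [mem_pvStep] at hx
      obtain ⟨t, ht, hr⟩ := hx
      exact ⟨t, ht, x, hr, hc⟩
    · rintro ⟨t, ht, x, hr, hc⟩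
      exact ⟨x, (mem_pvStep S last x).2 ⟨t, ht, hr⟩, hc⟩

-- A's recursion, restated on the reversed operand list (structural recursion)
def pvGo (left : Int) : List Int → Bool
  | [] => false
  | [r] => decide (left = r)
  | last :: r :: rest =>
    (PySem.Int.mod left last = 0 && pvGo (PySem.Int.floordiv left last) (r :: rest))
    || (decide (left - last ≥ 0) && pvGo (left - last) (r :: rest))
    || (PySem.Str.endswith (PySem.Int.toStr left) (PySem.Int.toStr last)
        && pvGo (PySem.Int.floordiv left ((10:Int) ^ (PySem.Str.len (PySem.Int.toStr last)).toNat)) (r :: rest))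

lemma pv_ite_chain (x y z : Bool) :
    (if x then true else if y then true else if z then true else false) = (x || y || z) := by
  cases x <;> cases y <;> cases z <;> rfl

-- unfolding of A's port on a list of length ≥ 2, written as (a :: l) ++ [last]
lemma can_do_concat (left last a : Int) (l : List Int) :
    can_do left ((a :: l) ++ [last]) =
      ((PySem.Int.mod left last = 0 && can_do (PySem.Int.floordiv left last) (a :: l))
      || (decide (left - last ≥ 0) && can_do (left - last) (a :: l))
      || (PySem.Str.endswith (PySem.Int.toStr left) (PySem.Int.toStr last)
          && can_do (PySem.Int.floordiv left ((10:Int) ^ (PySem.Str.len (PySem.Int.toStr last)).toNat)) (a :: l))) := by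
  cases l with
  | nil =>
    conv_lhs => rw [List.cons_append, List.nil_append, can_do]
    rw [pv_ite_chain]
    simp only [Bool.or_assoc]
    rfl
  | cons c l' =>
    have hd : (a :: c :: (l' ++ [last])).dropLast = a :: c :: l' := by
      rw [show a :: c :: (l' ++ [last]) = (a :: c :: l') ++ [last] from rfl, List.dropLast_concat]
    have hg : ∀ h : c :: (l' ++ [last]) ≠ [], (c :: (l' ++ [last])).getLast h = last := by
      intro h; simp [List.getLast_eq_getElem]
    conv_lhs => rw [List.cons_append, List.cons_append, can_do]
    rw [pv_ite_chain, hd, hg]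

lemma pvGo_eq_can_do (rl : List Int) : ∀ left : Int, pvGo left rl = can_do left rl.reverse := by
  induction rl with
  | nil => intro left; simp [pvGo, can_do]
  | cons last rl ih =>
    intro left
    cases rl with
    | nil => simp [pvGo, can_do]
    | cons r rest =>
      obtain ⟨a, l, hl⟩ := List.exists_cons_of_ne_nil (List.reverse_ne_nil_iff.2 (by simp) :
        (r :: rest).reverse ≠ [])
      rw [pvGo, List.reverse_cons, hl, can_do_concat, ← hl, ih, ih, ih]

lemma can_do_eq_pvGo (left : Int) (rights : List Int) :
    can_do left rights = pvGo left rights.reverse := by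
  rw [pvGo_eq_can_do, List.reverse_reverse]

lemma pvGo_append_iff (rl : List Int) (r0 : Int) : ∀ t : Int,
    pvGo t (rl ++ [r0]) = true ↔ pvChain t rl r0 := by
  induction rl with
  | nil => intro t; simp [pvGo, pvChain]
  | cons last rest ih =>
    intro t
    rw [List.cons_append, show rest ++ [r0] = rest ++ [r0] from rfl]
    obtain ⟨y, ys, hy⟩ := List.exists_cons_of_ne_nil (show rest ++ [r0] ≠ [] by simp)
    rw [hy, pvGo, ← hy]
    simp only [Bool.or_eq_true, Bool.and_eq_true, decide_eq_true_eq]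
    constructor
    · rintro ((⟨h1, h2⟩|⟨h1, h2⟩)|⟨h1, h2⟩)
      · exact ⟨_, Or.inl ⟨h1, rfl⟩, (ih _).1 h2⟩
      · exact ⟨_, Or.inr (Or.inl ⟨h1, rfl⟩), (ih _).1 h2⟩
      · exact ⟨_, Or.inr (Or.inr ⟨h1, rfl⟩), (ih _).1 h2⟩
    · rintro ⟨x, hr, hc⟩
      rcases hr with ⟨h1, rfl⟩|⟨h1, rfl⟩|⟨h1, rfl⟩
      · exact Or.inl (Or.inl ⟨h1, (ih _).2 hc⟩)
      · exact Or.inl (Or.inr ⟨h1, (ih _).2 hc⟩)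
      · exact Or.inr ⟨h1, (ih _).2 hc⟩

-- ===== VERDICT (by name: the statement is the Claim_ definition above) =====
theorem can_do_spec : Claim_equal_can_do := by
  intro left rights _ hpre
  unfold Spec_can_do
  obtain ⟨hne, -⟩ := hpre
  obtain ⟨r0, tl, rfl⟩ := List.exists_cons_of_ne_nil hne
  unfold can_do_alt
  simp only [List.drop_one, List.tail_cons]
  have hget : PySem.List.pyGet? (r0 :: tl) 0 = some r0 := by
    simp [PySem.List.pyGet?, PySem.List.pyIdx?]
  rw [hget, Bool.eq_iff_iff, can_do_eq_pvGo]
  have hrv : (r0 :: tl).reverse = tl.reverse ++ [r0] := by simp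
  rw [hrv, pvGo_append_iff, decide_eq_true_iff, mem_foldl_pvStep]
  constructor
  · intro h; exact ⟨left, by simp [PySem.Set.mem_ofList], h⟩
  · rintro ⟨t, ht, hc⟩
    have : t = left := by simpa [PySem.Set.mem_ofList] using ht
    exact this ▸ hc
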